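-- pv_equiv track=rewrite | github.com/baudren/advent-of-code | 2023/day14.py | move_grid_north
-- ===== SOURCE A (Python) =====
-- def move_grid_north(grid, bounds):
--     moved = False
--     for row in range(1, bounds[0]):
--         for col in range(bounds[1]):
--             key = (row, col)
--             before = (row-1, col)
--             if grid.get(key, '') == 'O' and before not in grid:
--                 grid[before] = 'O'
--                 del grid[key]
--                 moved = True
--     return moved
-- ===== SOURCE B (Python) =====
-- def move_grid_north(grid, bounds):
--     # Same in-place mutation and return value as the full-scan version, but
--     # visiting only the rocks, in row-major order.
--     rocks = sorted(k for k, v in grid.items()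
--                    if v == 'O' and 1 <= k[0] < bounds[0] and 0 <= k[1] < bounds[1])
--     moved = False
--     for r, c in rocks:
--         if (r - 1, c) not in grid:
--             grid[(r - 1, c)] = 'O'
--             del grid[(r, c)]
--             moved = True
--     return moved
-- ===== Notes on version B (the rewrite author's own statement) =====
-- stated objective: faster
-- what changed: Instead of scanning every (row,col) cell of the bounds rectangle and probing the dict per cell, B extracts the in-range rock coordinates once, sorts them row-major, and performs the moves by iterating only over the rocks.
import Mathlib
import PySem

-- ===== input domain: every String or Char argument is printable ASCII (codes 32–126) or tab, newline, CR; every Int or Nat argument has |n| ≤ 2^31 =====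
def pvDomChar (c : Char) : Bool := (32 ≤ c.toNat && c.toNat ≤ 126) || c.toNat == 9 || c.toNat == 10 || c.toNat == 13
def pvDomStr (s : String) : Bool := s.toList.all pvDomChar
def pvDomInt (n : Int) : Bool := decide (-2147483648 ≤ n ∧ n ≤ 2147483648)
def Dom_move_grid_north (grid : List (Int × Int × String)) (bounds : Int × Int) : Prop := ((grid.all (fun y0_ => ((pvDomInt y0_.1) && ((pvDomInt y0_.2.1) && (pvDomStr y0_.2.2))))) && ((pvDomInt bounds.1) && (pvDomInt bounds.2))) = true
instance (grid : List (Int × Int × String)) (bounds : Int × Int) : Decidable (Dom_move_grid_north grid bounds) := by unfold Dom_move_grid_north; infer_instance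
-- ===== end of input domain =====

-- B visits only the rocks (sorted row-major) instead of scanning every cell; same return value,
-- and in Python the same in-place mutations of `grid` in the same order.

-- ===== PORT A =====
def move_grid_north (grid : List (Int × Int × String)) (bounds : Int × Int) : Bool :=
  let g : PySem.Dict (Int × Int) String :=
    PySem.Dict.ofList (grid.map (fun y => ((y.1, y.2.1), y.2.2)))
  ((PySem.List.pyRange 1 bounds.1 1).foldl (fun st row =>
    (PySem.List.pyRange 0 bounds.2 1).foldl (fun st col =>
      if st.1.getD (row, col) "" == "O" && !(st.1.contains (row - 1, col)) then
        ((st.1.insert (row - 1, col) "O").erase (row, col), true)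
      else st) st) (g, false)).2

-- ===== PORT B =====
def move_grid_north_alt (grid : List (Int × Int × String)) (bounds : Int × Int) : Bool :=
  let g : PySem.Dict (Int × Int) String :=
    PySem.Dict.ofList (grid.map (fun y => ((y.1, y.2.1), y.2.2)))
  let rocks : List (Int × Int) :=
    PySem.List.sorted2
      ((g.items.filter (fun kv =>
          kv.2 == "O" && decide (1 ≤ kv.1.1) && decide (kv.1.1 < bounds.1)
            && decide (0 ≤ kv.1.2) && decide (kv.1.2 < bounds.2))).map (fun kv => kv.1))
      (fun k => k.1) (fun k => k.2)
  (rocks.foldl (fun st k =>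
      if !(st.1.contains (k.1 - 1, k.2)) then
        ((st.1.insert (k.1 - 1, k.2) "O").erase (k.1, k.2), true)
      else st) (g, false)).2

-- ===== PRECONDITION & SPEC =====
def Spec_move_grid_north (grid : List (Int × Int × String)) (bounds : Int × Int) (out : Bool) : Prop := out = move_grid_north_alt grid bounds
instance (grid : List (Int × Int × String)) (bounds : Int × Int) (out : Bool) : Decidable (Spec_move_grid_north grid bounds out) := by unfold Spec_move_grid_north; infer_instance

-- ===== CLAIM (what is proved, stated in full; the proofs are below) =====
def Claim_equal_move_grid_north : Prop := ∀ (grid : List (Int × Int × String)) (bounds : Int × Int), Dom_move_grid_north grid bounds → Spec_move_grid_north grid bounds (move_grid_north grid bounds)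

-- ===== LEMMAS AND PROOFS =====

-- B's per-rock step (the body of B's loop).
def pvStepB (st : PySem.Dict (Int × Int) String × Bool) (k : Int × Int) :
    PySem.Dict (Int × Int) String × Bool :=
  if !(st.1.contains (k.1 - 1, k.2)) then
    ((st.1.insert (k.1 - 1, k.2) "O").erase (k.1, k.2), true)
  else st

-- A's per-cell step (the body of A's inner loop), at row `row`.
def pvStepA (row : Int) (st : PySem.Dict (Int × Int) String × Bool) (col : Int) :
    PySem.Dict (Int × Int) String × Bool :=
  if st.1.getD (row, col) "" == "O" && !(st.1.contains (row - 1, col)) then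
    ((st.1.insert (row - 1, col) "O").erase (row, col), true)
  else st

-- the rocks of snapshot `g` in row `r`, in column order
def pvBlk (g : PySem.Dict (Int × Int) String) (b2 r : Int) : List (Int × Int) :=
  ((PySem.List.pyRange 0 b2 1).filter (fun c => g.getD (r, c) "" == "O")).map (fun c => (r, c))

theorem pv_get?_erase {κ ν : Type} [BEq κ] [LawfulBEq κ] [DecidableEq κ]
    (d : PySem.Dict κ ν) (k j : κ) :
    (d.erase k).get? j = if j = k then none else d.get? j := by
  rcases d with ⟨items⟩
  induction items with
  | nil => simp [PySem.Dict.erase, PySem.Dict.get?]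
  | cons p t ih =>
    by_cases hpk : p.1 = k <;> by_cases hjk : j = k <;>
        simp_all [PySem.Dict.erase, PySem.Dict.get?, List.find?_cons]
    · rw [beq_eq_false_iff_ne.mpr (fun h => hjk h.symm)]
    · cases h : p.1 == j <;> simp_all

theorem pv_get?_stepB (st : PySem.Dict (Int × Int) String × Bool) (k j : Int × Int)
    (h1 : j ≠ (k.1 - 1, k.2)) (h2 : j ≠ k) :
    (pvStepB st k).1.get? j = st.1.get? j := by
  unfold pvStepB
  split_ifs with h
  · simp only
    rw [pv_get?_erase, if_neg h2, PySem.Dict.get?_insert_of_ne _ _ h1]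
  · rfl

theorem pv_stepA_eq (g : PySem.Dict (Int × Int) String) (row col : Int)
    (st : PySem.Dict (Int × Int) String × Bool)
    (hag : st.1.get? (row, col) = g.get? (row, col)) :
    pvStepA row st col =
      if g.getD (row, col) "" == "O" then pvStepB st (row, col) else st := by
  unfold pvStepA pvStepB
  rw [PySem.Dict.getD_eq_get?_getD, hag, ← PySem.Dict.getD_eq_get?_getD]
  by_cases hrock : g.getD (row, col) "" == "O"
  · simp [hrock]
  · simp [hrock]

theorem pv_inner (g : PySem.Dict (Int × Int) String) (r : Int) :
    ∀ (cs : List Int), cs.Nodup →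
    ∀ (st : PySem.Dict (Int × Int) String × Bool),
      (∀ c ∈ cs, st.1.get? (r, c) = g.get? (r, c)) →
      cs.foldl (pvStepA r) st =
        ((cs.filter (fun c => g.getD (r, c) "" == "O")).map (fun c => ((r : Int), c))).foldl
          pvStepB st := by
  intro cs
  induction cs with
  | nil => intro _ st _; rfl
  | cons c t ih =>
    intro hnd st hag
    have hc : st.1.get? (r, c) = g.get? (r, c) := hag c (List.mem_cons_self ..)
    have hstep := pv_stepA_eq g r c st hc
    simp only [List.foldl_cons, List.filter_cons]
    by_cases hrock : g.getD (r, c) "" == "O"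
    · rw [hstep, if_pos hrock, hrock]
      apply ih hnd.of_cons
      intro c' hc'
      have hne : c' ≠ c := by
        rintro rfl; exact (List.nodup_cons.mp hnd).1 hc'
      rw [pv_get?_stepB _ _ _ (by simp; omega) (by simp [hne])]
      exact hag c' (List.mem_cons_of_mem _ hc')
    · rw [hstep, if_neg hrock]
      simp only [Bool.not_eq_true] at hrock
      rw [hrock]
      simp only [Bool.false_eq_true, if_false]
      exact ih hnd.of_cons st (fun c' hc' => hag c' (List.mem_cons_of_mem _ hc'))

theorem pv_foldB_rows (ks : List (Int × Int)) :
    ∀ (st : PySem.Dict (Int × Int) String × Bool) (j : Int × Int),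
      (∀ k ∈ ks, j.1 ≠ k.1 ∧ j.1 ≠ k.1 - 1) →
      (ks.foldl pvStepB st).1.get? j = st.1.get? j := by
  induction ks with
  | nil => intro st j _; rfl
  | cons k t ih =>
    intro st j h
    have hk := h k (List.mem_cons_self ..)
    rw [List.foldl_cons, ih _ _ (fun k' hk' => h k' (List.mem_cons_of_mem _ hk')),
      pv_get?_stepB st k j (by rintro rfl; exact hk.2 rfl) (by rintro rfl; exact hk.1 rfl)]

theorem pv_mem_blk (g : PySem.Dict (Int × Int) String) (b2 r : Int) (k : Int × Int) :
    k ∈ pvBlk g b2 r ↔ k.1 = r ∧ 0 ≤ k.2 ∧ k.2 < b2 ∧ g.getD k "" == "O" := by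
  unfold pvBlk
  simp only [List.mem_map, List.mem_filter, PySem.List.mem_pyRange_one]
  constructor
  · rintro ⟨c, ⟨⟨h0, hb⟩, hrock⟩, rfl⟩; exact ⟨rfl, h0, hb, hrock⟩
  · obtain ⟨k1, k2⟩ := k
    rintro ⟨h1, h0, hb, hrock⟩
    subst h1
    exact ⟨k2, ⟨⟨h0, hb⟩, hrock⟩, rfl⟩

theorem pv_outer (g : PySem.Dict (Int × Int) String) (b2 : Int) :
    ∀ (rs : List Int), rs.Pairwise (· < ·) →
    ∀ (st : PySem.Dict (Int × Int) String × Bool),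
      (∀ r ∈ rs, ∀ c, st.1.get? (r, c) = g.get? (r, c)) →
      rs.foldl (fun st r => (PySem.List.pyRange 0 b2 1).foldl (pvStepA r) st) st =
        (rs.flatMap (pvBlk g b2)).foldl pvStepB st := by
  intro rs
  induction rs with
  | nil => intro _ st _; rfl
  | cons r t ih =>
    intro hpw st hag
    have hlt : ∀ r' ∈ t, r < r' := fun r' hr' => List.rel_of_pairwise_cons hpw hr'
    simp only [List.foldl_cons, List.flatMap_cons, List.foldl_append]
    rw [pv_inner g r _ (PySem.List.nodup_pyRange_one 0 b2) st
      (fun c _ => hag r (List.mem_cons_self ..) c)]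
    have hblk : ((PySem.List.pyRange 0 b2 1).filter
        (fun c => g.getD (r, c) "" == "O")).map (fun c => ((r : Int), c)) = pvBlk g b2 r := rfl
    rw [hblk]
    apply ih hpw.of_cons
    intro r' hr' c
    rw [pv_foldB_rows (pvBlk g b2 r) st (r', c)]
    · exact hag r' (List.mem_cons_of_mem _ hr') c
    · intro k hk
      have := (pv_mem_blk g b2 r k).mp hk
      have := hlt r' hr'
      constructor <;> (simp; omega)

-- the row-major list of in-range rocks of g, pairwise strictly increasing in the lex key
theorem pv_flat_pairwise (g : PySem.Dict (Int × Int) String) (b2 : Int) :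
    ∀ (rs : List Int), rs.Pairwise (· < ·) →
      (rs.flatMap (pvBlk g b2)).Pairwise
        (fun a b => (toLex (a.1, a.2) : Int ×ₗ Int) < toLex (b.1, b.2)) := by
  intro rs
  induction rs with
  | nil => intro _; simp
  | cons r t ih =>
    intro hpw
    have hlt : ∀ r' ∈ t, r < r' := fun r' hr' => List.rel_of_pairwise_cons hpw hr'
    simp only [List.flatMap_cons]
    rw [List.pairwise_append]
    refine ⟨?_, ih hpw.of_cons, ?_⟩
    · unfold pvBlk
      rw [List.pairwise_map]
      apply List.Pairwise.filter
      apply (PySem.List.pairwise_lt_pyRange_one 0 b2).imp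
      intro a b hab
      rw [Prod.Lex.lt_iff]
      right; exact ⟨rfl, hab⟩
    · intro a ha b hb
      have ha' := (pv_mem_blk g b2 r a).mp ha
      rcases List.mem_flatMap.mp hb with ⟨r', hr', hbr'⟩
      have hb' := (pv_mem_blk g b2 r' b).mp hbr'
      rw [Prod.Lex.lt_iff]
      left
      simp only [ha'.1, hb'.1]
      exact hlt r' hr'

-- Python's tuple sort of the pairs = sort by the lexicographic key
theorem pv_sorted2_eq_sorted_lex (xs : List (Int × Int)) :
    PySem.List.sorted2 xs (fun k => k.1) (fun k => k.2) =
      PySem.List.sorted xs (fun k => (toLex (k.1, k.2) : Int ×ₗ Int)) := by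
  unfold PySem.List.sorted2 PySem.List.sorted
  have : (fun (a b : Int × Int) =>
        decide (a.1 < b.1) || !decide (b.1 < a.1) && decide (a.2 < b.2)) =
      (fun (a b : Int × Int) =>
        decide ((toLex (a.1, a.2) : Int ×ₗ Int) < toLex (b.1, b.2))) := by
    funext a b
    by_cases h1 : a.1 < b.1 <;> by_cases h2 : b.1 < a.1 <;> by_cases h3 : a.2 < b.2 <;>
      by_cases h4 : a.1 = b.1 <;> simp_all [Prod.Lex.lt_iff]
    omega
  simp only [this]
  simp

theorem pv_rocks_eq (g : PySem.Dict (Int × Int) String) (b1 b2 : Int)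
    (hnd : g.keys.Nodup) :
    PySem.List.sorted2
      ((g.items.filter (fun kv =>
          kv.2 == "O" && decide (1 ≤ kv.1.1) && decide (kv.1.1 < b1)
            && decide (0 ≤ kv.1.2) && decide (kv.1.2 < b2))).map (fun kv => kv.1))
      (fun k => k.1) (fun k => k.2) =
    (PySem.List.pyRange 1 b1 1).flatMap (pvBlk g b2) := by
  rw [pv_sorted2_eq_sorted_lex]
  apply PySem.List.sorted_eq_of_perm_of_pairwise_lt
  · -- permutation: same members, both Nodup
    have hndR : ((g.items.filter (fun kv =>
          kv.2 == "O" && decide (1 ≤ kv.1.1) && decide (kv.1.1 < b1)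
            && decide (0 ≤ kv.1.2) && decide (kv.1.2 < b2))).map
            (fun kv : (Int × Int) × String => kv.1)).Nodup := by
      have : (g.items.filter (fun kv =>
          kv.2 == "O" && decide (1 ≤ kv.1.1) && decide (kv.1.1 < b1)
            && decide (0 ≤ kv.1.2) && decide (kv.1.2 < b2))).map
            (fun kv : (Int × Int) × String => kv.1) |>.Sublist g.keys :=
        List.Sublist.map _ (List.filter_sublist (l := g.items))
      exact this.nodup hnd
    have hndF : ((PySem.List.pyRange 1 b1 1).flatMap (pvBlk g b2)).Nodup := by
      have := pv_flat_pairwise g b2 (PySem.List.pyRange 1 b1 1)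
        (PySem.List.pairwise_lt_pyRange_one 1 b1)
      have hne : ((PySem.List.pyRange 1 b1 1).flatMap (pvBlk g b2)).Pairwise (· ≠ ·) :=
        this.imp (fun h he => by rw [he] at h; exact lt_irrefl _ h)
      exact hne
    rw [List.perm_ext_iff_of_nodup hndF hndR]
    intro k
    have hmemF : k ∈ (PySem.List.pyRange 1 b1 1).flatMap (pvBlk g b2) ↔
        1 ≤ k.1 ∧ k.1 < b1 ∧ 0 ≤ k.2 ∧ k.2 < b2 ∧ g.getD k "" == "O" := by
      rw [List.mem_flatMap]
      constructor
      · rintro ⟨r, hr, hk⟩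
        have h := (pv_mem_blk g b2 r k).mp hk
        rw [PySem.List.mem_pyRange_one] at hr
        exact ⟨by omega, by omega, h.2.1, h.2.2.1, h.2.2.2⟩
      · rintro ⟨h1, h2, h3, h4, h5⟩
        exact ⟨k.1, PySem.List.mem_pyRange_one.mpr ⟨h1, h2⟩,
          (pv_mem_blk g b2 k.1 k).mpr ⟨rfl, h3, h4, h5⟩⟩
    rw [hmemF, List.mem_map]
    constructor
    · rintro ⟨h1, h2, h3, h4, h5⟩
      have : g.get? k = some "O" := by
        rw [PySem.Dict.getD_eq_get?_getD] at h5
        cases hg : g.get? k with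
        | none => rw [hg] at h5; simp at h5
        | some v => rw [hg] at h5; simp at h5; rw [h5]
      refine ⟨(k, "O"), List.mem_filter.mpr ⟨?_, ?_⟩, rfl⟩
      · exact (PySem.Dict.get?_eq_some_iff_mem_items g k "O" hnd).mp this
      · simp only [beq_self_eq_true, Bool.true_and]
        simp [h1, h2, h3, h4]
    · rintro ⟨⟨k', v⟩, hkv, rfl⟩
      rcases List.mem_filter.mp hkv with ⟨hmem, hcond⟩
      simp only [beq_iff_eq, Bool.and_eq_true, decide_eq_true_eq] at hcond
      obtain ⟨⟨⟨⟨hv, hb1⟩, hb2⟩, hb3⟩, hb4⟩ := hcond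
      subst hv
      have : g.get? k' = some "O" :=
        (PySem.Dict.get?_eq_some_iff_mem_items g k' "O" hnd).mpr hmem
      refine ⟨hb1, hb2, hb3, hb4, ?_⟩
      rw [PySem.Dict.getD_eq_get?_getD, this]
      simp
  · exact pv_flat_pairwise g b2 (PySem.List.pyRange 1 b1 1)
      (PySem.List.pairwise_lt_pyRange_one 1 b1)

-- ===== VERDICT (by name: the statement is the Claim_ definition above) =====
theorem move_grid_north_spec : Claim_equal_move_grid_north := by
  intro grid bounds _
  unfold Spec_move_grid_north move_grid_north move_grid_north_alt
  simp only
  set g : PySem.Dict (Int × Int) String :=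
    PySem.Dict.ofList (grid.map (fun y => ((y.1, y.2.1), y.2.2))) with hg
  have hnd : g.keys.Nodup := PySem.Dict.nodup_keys_ofList _
  rw [pv_rocks_eq g bounds.1 bounds.2 hnd]
  have hA : (PySem.List.pyRange 1 bounds.1 1).foldl (fun st row =>
      (PySem.List.pyRange 0 bounds.2 1).foldl (fun st col =>
        if st.1.getD (row, col) "" == "O" && !(st.1.contains (row - 1, col)) then
          ((st.1.insert (row - 1, col) "O").erase (row, col), true)
        else st) st) (g, false) =
      (PySem.List.pyRange 1 bounds.1 1).foldl (fun st r =>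
        (PySem.List.pyRange 0 bounds.2 1).foldl (pvStepA r) st) (g, false) := rfl
  have hB : ∀ (ks : List (Int × Int)),
      ks.foldl (fun st k =>
        if !(st.1.contains (k.1 - 1, k.2)) then
          ((st.1.insert (k.1 - 1, k.2) "O").erase (k.1, k.2), true)
        else st) (g, false) = ks.foldl pvStepB (g, false) := fun _ => rfl
  rw [hA, hB]
  rw [pv_outer g bounds.2 (PySem.List.pyRange 1 bounds.1 1)
    (PySem.List.pairwise_lt_pyRange_one 1 bounds.1) (g, false) (fun _ _ _ => rfl)]
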